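-- pv_equiv track=rewrite | github.com/AnVuVa/MCSPR | scripts/gene_selection_analysis.py | build_lopcv_fold
-- ===== SOURCE A (Python) =====
-- def get_patient_id(sample_name: str) -> str:
--     """A1 -> A, B2 -> B, etc. (MERGE bare naming convention)."""
--     return sample_name[0].upper()
--
-- def build_lopcv_fold(sample_names, fold_idx):
--     """Patient-level LOPCV for HER2ST (8 patients)."""
--     from collections import defaultdict
--
--     patient_map = defaultdict(list)
--     for s in sample_names:
--         patient_map[get_patient_id(s)].append(s)
--     patients = sorted(patient_map.keys())
--     held = patients[fold_idx]
--     test = patient_map[held]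
--     train = [s for p in patients if p != held for s in patient_map[p]]
--     return train, test
-- ===== SOURCE B (Python) =====
-- def get_patient_id(sample_name: str) -> str:
--     """A1 -> A, B2 -> B, etc. (MERGE bare naming convention)."""
--     return sample_name[0].upper()
--
-- def build_lopcv_fold(sample_names, fold_idx):
--     """Patient-level LOPCV: sort-then-partition instead of dict grouping."""
--     held = sorted({get_patient_id(s) for s in sample_names})[fold_idx]
--     ordered = sorted(sample_names, key=get_patient_id)  # stable sort
--     train = [s for s in ordered if get_patient_id(s) != held]
--     test = [s for s in ordered if get_patient_id(s) == held]
--     return train, test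
-- ===== Notes on version B (the rewrite author's own statement) =====
-- stated objective: alternative
-- what changed: Replaces the defaultdict grouping plus per-patient concatenation with a stable sort of the samples by patient id followed by a single partition against the held-out id taken from the sorted distinct ids.
import Mathlib
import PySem

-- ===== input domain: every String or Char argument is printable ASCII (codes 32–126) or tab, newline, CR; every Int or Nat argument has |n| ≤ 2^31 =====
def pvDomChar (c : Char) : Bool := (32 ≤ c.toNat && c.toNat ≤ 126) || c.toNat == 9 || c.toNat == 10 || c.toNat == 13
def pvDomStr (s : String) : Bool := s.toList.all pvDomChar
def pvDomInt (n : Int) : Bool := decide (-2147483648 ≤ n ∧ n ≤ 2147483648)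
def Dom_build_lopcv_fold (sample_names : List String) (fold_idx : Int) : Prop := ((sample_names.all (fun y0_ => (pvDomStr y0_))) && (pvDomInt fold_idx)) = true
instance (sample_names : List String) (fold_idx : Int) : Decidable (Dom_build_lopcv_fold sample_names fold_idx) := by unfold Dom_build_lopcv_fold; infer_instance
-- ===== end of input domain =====

-- B replaces A's defaultdict grouping + per-patient concatenation by a stable sort of the
-- samples by patient id followed by one partition against the held-out id (objective: alternative).

-- ===== PORT A =====
-- shared helper (identical in both Python sources): sample_name[0].upper()
def get_patient_id (s : String) : String :=
  match PySem.Str.pyGet? s 0 with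
  | some c => PySem.Str.upper (String.ofList [c])
  | none => ""   -- Python raises IndexError on the empty string; excluded by Pre_

def build_lopcv_fold (sample_names : List String) (fold_idx : Int) : List String × List String :=
  -- patient_map = defaultdict(list); for s: patient_map[get_patient_id(s)].append(s)
  let patient_map : PySem.Dict String (List String) :=
    sample_names.foldl (fun d s => d.modify (get_patient_id s) [] (fun g => g ++ [s])) PySem.Dict.empty
  let patients := PySem.List.sorted patient_map.keys (fun p => p) false
  match PySem.List.pyGet? patients fold_idx with
  | none => ([], [])   -- patients[fold_idx] raises IndexError in Python; excluded by Pre_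
  | some held =>
    let test := patient_map.getD held []
    let train := (patients.filter (fun p => p ≠ held)).flatMap (fun p => patient_map.getD p [])
    (train, test)

-- ===== PORT B =====
def build_lopcv_fold_alt (sample_names : List String) (fold_idx : Int) : List String × List String :=
  let ids : PySem.Set String := PySem.Set.ofList (sample_names.map get_patient_id)
  match PySem.List.pyGet? (PySem.List.sorted ids (fun p => p) false) fold_idx with
  | none => ([], [])   -- IndexError in Python; excluded by Pre_
  | some held =>
    let ordered := PySem.List.sorted sample_names get_patient_id false   -- stable sort
    (ordered.filter (fun s => get_patient_id s ≠ held),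
     ordered.filter (fun s => get_patient_id s = held))

-- ===== PRECONDITION & SPEC =====
-- Pre_ excludes exactly the inputs where the Python A raises: an empty sample name
-- (IndexError in get_patient_id) and a fold_idx outside Python index range for the
-- list of distinct patient ids (IndexError on patients[fold_idx]).
def Pre_build_lopcv_fold (sample_names : List String) (fold_idx : Int) : Prop :=
  (∀ s ∈ sample_names, s ≠ "") ∧
  PySem.Raise.InRange (PySem.Set.ofList (sample_names.map get_patient_id)).length fold_idx
instance (sample_names : List String) (fold_idx : Int) : Decidable (Pre_build_lopcv_fold sample_names fold_idx) := by unfold Pre_build_lopcv_fold; infer_instance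

def pvWitness_build_lopcv_fold : List String × Int := (["A1", "b2", "A3"], -1)

def Spec_build_lopcv_fold (sample_names : List String) (fold_idx : Int) (out : List String × List String) : Prop := out = build_lopcv_fold_alt sample_names fold_idx
instance (sample_names : List String) (fold_idx : Int) (out : List String × List String) : Decidable (Spec_build_lopcv_fold sample_names fold_idx out) := by unfold Spec_build_lopcv_fold; infer_instance

-- ===== CLAIM (what is proved, stated in full; the proofs are below) =====
def Claim_equal_build_lopcv_fold : Prop := ∀ (sample_names : List String) (fold_idx : Int), Dom_build_lopcv_fold sample_names fold_idx → Pre_build_lopcv_fold sample_names fold_idx → Spec_build_lopcv_fold sample_names fold_idx (build_lopcv_fold sample_names fold_idx)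

-- ===== LEMMAS AND PROOFS =====

-- insertBy passes over a block it does not go before
theorem pv_insertBy_append {α : Type} (before : α → α → Bool) (x : α) (A B : List α)
    (h : ∀ a ∈ A, before x a = false) :
    PySem.List.insertBy before x (A ++ B) = A ++ PySem.List.insertBy before x B := by
  induction A with
  | nil => simp
  | cons a t ih =>
      have ha : before x a = false := h a (List.mem_cons_self)
      simp [PySem.List.insertBy, ha, ih (fun y hy => h y (List.mem_cons_of_mem a hy))]

-- insertBy goes to the front of a block it goes before everywhere
theorem pv_insertBy_front {α : Type} (before : α → α → Bool) (x : α) (B : List α)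
    (h : ∀ y ∈ B, before x y = true) :
    PySem.List.insertBy before x B = x :: B := by
  cases B with
  | nil => rfl
  | cons b t => simp [PySem.List.insertBy, h b (List.mem_cons_self)]

theorem pv_flatMap_congr {κ α : Type} {G : List κ} {f g : κ → List α}
    (h : ∀ p ∈ G, f p = g p) : G.flatMap f = G.flatMap g := by
  induction G with
  | nil => rfl
  | cons a t ih =>
      simp [List.flatMap_cons, h a (List.mem_cons_self),
            ih (fun p hp => h p (List.mem_cons_of_mem a hp))]

-- inserting one element into a key-grouped concatenation
theorem pv_insertBy_flatMap {α κ : Type} [LinearOrder κ] (key : α → κ) (x : α)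
    (G : List κ) (grp : κ → List α)
    (hG : G.Pairwise (· < ·))
    (hkey : ∀ p ∈ G, ∀ a ∈ grp p, key a = p)
    (hout : key x ∉ G → grp (key x) = []) :
    PySem.List.insertBy (fun a b => decide (key a < key b)) x (G.flatMap grp) =
    (if key x ∈ G then G else PySem.List.insertBy (fun a b => decide (a < b)) (key x) G).flatMap
      (fun p => grp p ++ if key x = p then [x] else []) := by
  induction G with
  | nil =>
      have h0 : grp (key x) = [] := hout (by simp)
      simp [PySem.List.insertBy, h0]
  | cons g G' ih =>
      have hgG' : ∀ p ∈ G', g < p := (List.pairwise_cons.mp hG).1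
      have hG' : G'.Pairwise (· < ·) := (List.pairwise_cons.mp hG).2
      have hkg : ∀ a ∈ grp g, key a = g := hkey g (List.mem_cons_self)
      have hkey' : ∀ p ∈ G', ∀ a ∈ grp p, key a = p :=
        fun p hp => hkey p (List.mem_cons_of_mem _ hp)
      rcases lt_trichotomy (key x) g with hlt | heq | hgt
      · -- key x < g : x becomes a new first group
        have hnot : key x ∉ g :: G' := by
          intro hmem
          rcases List.mem_cons.mp hmem with e | hmem'
          · exact absurd e (ne_of_lt hlt)
          · exact absurd hlt (not_lt.mpr (le_of_lt (hgG' _ hmem')))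
        have hall : ∀ y ∈ (g :: G').flatMap grp,
            (fun a b => decide (key a < key b)) x y = true := by
          intro y hy
          rcases List.mem_flatMap.mp hy with ⟨p, hp, hyp⟩
          have hyp' : key y = p := hkey p hp y hyp
          have hgp : g ≤ p := by
            rcases List.mem_cons.mp hp with e | hm
            · exact le_of_eq e.symm
            · exact le_of_lt (hgG' _ hm)
          simp only [decide_eq_true_eq, hyp']
          exact lt_of_lt_of_le hlt hgp
        rw [pv_insertBy_front _ _ _ hall, if_neg hnot]
        have hins : PySem.List.insertBy (fun a b => decide (a < b)) (key x) (g :: G') =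
            key x :: g :: G' := by
          simp [PySem.List.insertBy, hlt]
        rw [hins]
        have h0 : grp (key x) = [] := hout hnot
        have hcong : (g :: G').flatMap (fun p => grp p ++ if key x = p then [x] else []) =
            (g :: G').flatMap grp := by
          apply pv_flatMap_congr
          intro p hp
          have hne : key x ≠ p := by
            intro e; exact hnot (e ▸ hp)
          simp [hne]
        simp [List.flatMap_cons, h0, hcong]
      · -- key x = g : x is appended to group g
        have hmem : key x ∈ g :: G' := by simp [heq]
        rw [if_pos hmem]
        simp only [List.flatMap_cons]
        rw [pv_insertBy_append _ x (grp g) _ (by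
          intro a ha
          simp only [decide_eq_false_iff_not, hkg a ha, heq]
          exact lt_irrefl g)]
        rw [pv_insertBy_front _ x _ (by
          intro y hy
          rcases List.mem_flatMap.mp hy with ⟨p, hp, hyp⟩
          simp only [decide_eq_true_eq, hkey' p hp y hyp, heq]
          exact hgG' p hp)]
        have hcong : G'.flatMap (fun p => grp p ++ if key x = p then [x] else []) =
            G'.flatMap grp := by
          apply pv_flatMap_congr
          intro p hp
          have hne : key x ≠ p := by
            rw [heq]; exact ne_of_lt (hgG' p hp)
          simp [hne]
        simp only [hcong]
        simp [heq]
      · -- g < key x : group g is passed over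
        have hka : ∀ a ∈ grp g, (fun a b => decide (key a < key b)) x a = false := by
          intro a ha
          simp only [decide_eq_false_iff_not, hkg a ha]
          exact not_lt.mpr (le_of_lt hgt)
        have hgne : key x ≠ g := ne_of_gt hgt
        have hout' : key x ∉ G' → grp (key x) = [] := by
          intro hn
          apply hout
          simp [List.mem_cons, hgne, hn]
        simp only [List.flatMap_cons]
        rw [pv_insertBy_append _ x (grp g) _ hka, ih hG' hkey' hout']
        have hgrpg : grp g ++ (if key x = g then [x] else []) = grp g := by simp [hgne]
        by_cases hmem : key x ∈ G'
        · rw [if_pos hmem, if_pos (List.mem_cons_of_mem _ hmem)]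
          simp [List.flatMap_cons, hgrpg]
        · have hnot : key x ∉ g :: G' := by simp [List.mem_cons, hgne, hmem]
          rw [if_neg hmem, if_neg hnot]
          have hins : PySem.List.insertBy (fun a b => decide (a < b)) (key x) (g :: G') =
              g :: PySem.List.insertBy (fun a b => decide (a < b)) (key x) G' := by
            simp [PySem.List.insertBy, not_lt.mpr (le_of_lt hgt)]
          rw [hins]
          simp [List.flatMap_cons, hgrpg]

-- the stable sort by key is the concatenation, over the sorted distinct keys, of the
-- original-order groups
theorem pv_sorted_key_flatMap {α κ : Type} [LinearOrder κ] [BEq κ] [LawfulBEq κ]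
    (key : α → κ) (l : List α) :
    PySem.List.sorted l key false =
    (PySem.List.sorted (PySem.Set.ofList (l.map key)) (fun p => p) false).flatMap
      (fun p => l.filter (fun s => key s = p)) := by
  induction l using List.reverseRecOn with
  | nil => simp [PySem.List.sorted]
  | append_singleton l x ih =>
      have hstep : PySem.List.sorted (l ++ [x]) key false =
          PySem.List.insertBy (fun a b => decide (key a < key b)) x
            (PySem.List.sorted l key false) := by
        rw [PySem.List.sorted_eq_foldl_insertBy, PySem.List.sorted_eq_foldl_insertBy,
            List.foldl_append]
        rfl
      have hG : (PySem.List.sorted (PySem.Set.ofList (l.map key)) (fun p => p) false).Pairwise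
          (· < ·) := PySem.List.sorted_ofList_pairwise_lt _
      have hkeyh : ∀ p ∈ PySem.List.sorted (PySem.Set.ofList (l.map key)) (fun p => p) false,
          ∀ a ∈ l.filter (fun s => key s = p), key a = p := by
        intro p _ a ha
        exact of_decide_eq_true (List.mem_filter.mp ha).2
      have houth : key x ∉ PySem.List.sorted (PySem.Set.ofList (l.map key)) (fun p => p) false →
          l.filter (fun s => key s = key x) = [] := by
        intro hn
        rw [PySem.List.mem_sorted, PySem.Set.mem_ofList] at hn
        apply List.filter_eq_nil_iff.mpr
        intro a ha
        simp only [decide_eq_true_eq]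
        intro e
        exact hn (e ▸ List.mem_map_of_mem ha)
      rw [hstep, ih, pv_insertBy_flatMap key x _ _ hG hkeyh houth]
      -- the sorted distinct keys of l ++ [x]
      have hofl : PySem.Set.ofList ((l ++ [x]).map key) =
          PySem.Set.add (PySem.Set.ofList (l.map key)) (key x) := by
        rw [List.map_append, PySem.Set.ofList_eq_foldl, List.foldl_append,
            ← PySem.Set.ofList_eq_foldl]
        rfl
      by_cases hmem : key x ∈ PySem.Set.ofList (l.map key)
      · have hcont : (PySem.Set.ofList (l.map key)).contains (key x) = true := by
          simp only [PySem.Set.contains, List.contains_eq_mem, decide_eq_true_eq]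
          exact hmem
        have hadd : PySem.Set.add (PySem.Set.ofList (l.map key)) (key x) =
            PySem.Set.ofList (l.map key) := by
          simp only [PySem.Set.add]
          rw [if_pos hcont]
        have hmemG : key x ∈ PySem.List.sorted (PySem.Set.ofList (l.map key)) (fun p => p) false := by
          rw [PySem.List.mem_sorted]; exact hmem
        rw [if_pos hmemG, hofl, hadd]
        apply pv_flatMap_congr
        intro p hp
        simp [List.filter_append, List.filter_cons]
      · have hcont : (PySem.Set.ofList (l.map key)).contains (key x) = false := by
          simp only [PySem.Set.contains, List.contains_eq_mem, decide_eq_false_iff_not]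
          exact hmem
        have hadd : PySem.Set.add (PySem.Set.ofList (l.map key)) (key x) =
            PySem.Set.ofList (l.map key) ++ [key x] := by
          simp only [PySem.Set.add]
          rw [if_neg (by rw [hcont]; exact Bool.false_ne_true)]
        have hmemG : key x ∉ PySem.List.sorted (PySem.Set.ofList (l.map key)) (fun p => p) false := by
          rw [PySem.List.mem_sorted]; exact hmem
        have hsortapp : PySem.List.sorted (PySem.Set.ofList (l.map key) ++ [key x])
            (fun p => p) false =
            PySem.List.insertBy (fun a b => decide (a < b)) (key x)
              (PySem.List.sorted (PySem.Set.ofList (l.map key)) (fun p => p) false) := by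
          rw [PySem.List.sorted_eq_foldl_insertBy, PySem.List.sorted_eq_foldl_insertBy,
              List.foldl_append]
          rfl
        rw [if_neg hmemG, hofl, hadd, hsortapp]
        apply pv_flatMap_congr
        intro p hp
        simp [List.filter_append, List.filter_cons]

theorem pv_filter_flatMap {κ α : Type} (G : List κ) (f : κ → List α) (q : α → Bool) :
    (G.flatMap f).filter q = G.flatMap (fun p => (f p).filter q) := by
  induction G with
  | nil => rfl
  | cons a t ih => simp [List.flatMap_cons, List.filter_append, ih]

theorem pv_flatMap_filter {κ α : Type} (G : List κ) (f : κ → List α) (q : κ → Bool) :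
    (G.filter q).flatMap f = G.flatMap (fun p => if q p then f p else []) := by
  induction G with
  | nil => rfl
  | cons a t ih =>
      by_cases h : q a = true <;> simp [h, List.flatMap_cons, ih]

theorem pv_flatMap_single {κ α : Type} [DecidableEq κ] (G : List κ) (f : κ → List α)
    (c : κ) (v : List α)
    (hnd : G.Nodup) (hc : c ∈ G) (h : ∀ p ∈ G, f p = if p = c then v else []) :
    G.flatMap f = v := by
  induction G with
  | nil => cases hc
  | cons a t ih =>
      by_cases hca : a = c
      · subst hca
        have ht : t.flatMap f = [] := by
          apply List.flatMap_eq_nil_iff.mpr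
          intro p hp
          have hpa : p ≠ a := fun e => (List.nodup_cons.mp hnd).1 (e ▸ hp)
          simpa [hpa] using h p (List.mem_cons_of_mem a hp)
        have ha : f a = v := by simpa using h a (List.mem_cons_self)
        simp [List.flatMap_cons, ha, ht]
      · have hct : c ∈ t := (List.mem_cons.mp hc).resolve_left (fun e => hca e.symm)
        have hfa : f a = [] := by simpa [hca] using h a (List.mem_cons_self)
        simp [List.flatMap_cons, hfa,
              ih (List.nodup_cons.mp hnd).2 hct (fun p hp => h p (List.mem_cons_of_mem a hp))]

theorem pv_mem_of_pyGet? {α : Type} {xs : List α} {i : Int} {v : α}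
    (h : PySem.List.pyGet? xs i = some v) : v ∈ xs := by
  unfold PySem.List.pyGet? at h
  cases hk : PySem.List.pyIdx? xs.length i with
  | none => simp [hk] at h
  | some k =>
      simp [hk] at h
      exact List.mem_of_getElem? h

theorem pv_AB_eq (sample_names : List String) (fold_idx : Int) :
    build_lopcv_fold sample_names fold_idx = build_lopcv_fold_alt sample_names fold_idx := by
  unfold build_lopcv_fold build_lopcv_fold_alt
  dsimp only
  have hkeys : (sample_names.foldl
      (fun d s => d.modify (get_patient_id s) [] (fun g => g ++ [s])) PySem.Dict.empty).keys =
      PySem.Set.ofList (sample_names.map get_patient_id) := by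
    rw [PySem.Dict.keys_foldl_modify_key sample_names get_patient_id []
        (fun _ s g => g ++ [s]) PySem.Dict.empty, PySem.Dict.keys_empty,
        PySem.Set.ofList_eq_foldl]
    rfl
  have hget : ∀ c, (sample_names.foldl
      (fun d s => d.modify (get_patient_id s) [] (fun g => g ++ [s])) PySem.Dict.empty).getD c [] =
      sample_names.filter (fun s => get_patient_id s = c) := by
    intro c
    have h := PySem.Dict.getD_foldl_modify_append
      (sample_names.map (fun s => (get_patient_id s, s))) PySem.Dict.empty c
    rw [List.foldl_map] at h
    simp only [PySem.Dict.getD_empty, List.nil_append, List.filter_map] at h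
    have hpq : List.filter ((fun p : String × String => p.1 == c) ∘ fun s => (get_patient_id s, s))
        sample_names = List.filter (fun s => decide (get_patient_id s = c)) sample_names := by
      apply List.filter_congr
      intro a _
      by_cases hh : get_patient_id a = c <;> simp [Function.comp, hh]
    rw [h, hpq, List.map_map,
        show ((fun x : String × String => x.2) ∘ fun s => (get_patient_id s, s)) = id from rfl,
        List.map_id]
  rw [hkeys]
  cases hheld : PySem.List.pyGet?
      (PySem.List.sorted (PySem.Set.ofList (sample_names.map get_patient_id)) (fun p => p) false)
      fold_idx with
  | none => rfl
  | some held =>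
      have hmemG : held ∈ PySem.List.sorted (PySem.Set.ofList (sample_names.map get_patient_id))
          (fun p => p) false := pv_mem_of_pyGet? hheld
      have hG := PySem.List.sorted_ofList_pairwise_lt (κ := String) (sample_names.map get_patient_id)
      have hnd : (PySem.List.sorted (PySem.Set.ofList (sample_names.map get_patient_id))
          (fun p => p) false).Nodup := hG.nodup
      have hord := pv_sorted_key_flatMap get_patient_id sample_names
      -- test component
      have htest : (PySem.List.sorted sample_names get_patient_id false).filter
          (fun s => get_patient_id s = held) =
          sample_names.filter (fun s => get_patient_id s = held) := by
        rw [hord, pv_filter_flatMap]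
        apply pv_flatMap_single _ _ held _ hnd hmemG
        intro p hp
        by_cases hph : p = held
        · subst hph
          rw [if_pos rfl]
          apply List.filter_eq_self.mpr
          intro a ha
          exact (List.mem_filter.mp ha).2
        · rw [if_neg hph]
          apply List.filter_eq_nil_iff.mpr
          intro a ha
          have : get_patient_id a = p := of_decide_eq_true (List.mem_filter.mp ha).2
          simp [this, hph]
      -- train component
      have htrain : ((PySem.List.sorted (PySem.Set.ofList (sample_names.map get_patient_id))
            (fun p => p) false).filter (fun p => p ≠ held)).flatMap
            (fun p => sample_names.filter (fun s => get_patient_id s = p)) =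
          (PySem.List.sorted sample_names get_patient_id false).filter
            (fun s => get_patient_id s ≠ held) := by
        rw [hord, pv_filter_flatMap, pv_flatMap_filter]
        apply pv_flatMap_congr
        intro p hp
        by_cases hph : p = held
        · subst hph
          simp only [decide_not]
          rw [if_neg (by simp)]
          symm
          apply List.filter_eq_nil_iff.mpr
          intro a ha
          have : get_patient_id a = p := of_decide_eq_true (List.mem_filter.mp ha).2
          simp [this]
        · rw [if_pos (by simp [hph])]
          symm
          apply List.filter_eq_self.mpr
          intro a ha
          have : get_patient_id a = p := of_decide_eq_true (List.mem_filter.mp ha).2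
          simp [this, hph]
      simp only [hget, htest, htrain]

-- ===== VERDICT (by name: the statement is the Claim_ definition above) =====
theorem build_lopcv_fold_spec : Claim_equal_build_lopcv_fold := by
  intro sn fi _ _
  unfold Spec_build_lopcv_fold
  exact pv_AB_eq sn fi
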